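-- pv_equiv track=rewrite | github.com/HolaOrca/PolarProject | BaseAnalysis/物种丰富度_子区域.py | region_sort_key
-- ===== SOURCE A (Python) =====
-- def region_sort_key(region):
--     number = ''
--     letter = ''
--     for char in region:
--         if char.isdigit():
--             number += char
--         else:
--             letter = char
--     return (int(number) if number else 0, letter)
-- ===== SOURCE B (Python) =====
-- def region_sort_key(region):
--     # Single reverse pass with place-value arithmetic: no digit string is built
--     # and nothing is parsed with int(); the number is assembled from the least
--     # significant digit upward, and the letter is the first non-digit seen
--     # (i.e. the last one of the original string), locked in once found.
--     value = 0
--     place = 1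
--     letter = ''
--     for c in reversed(region):
--         if c.isdigit():
--             value += (ord(c) - ord('0')) * place
--             place *= 10
--         elif not letter:
--             letter = c
--     return (value, letter)
-- ===== Notes on version B (the rewrite author's own statement) =====
-- stated objective: alternative
-- what changed: B traverses the string once in reverse, assembling the number arithmetically from place values (value += digit*place, place *= 10) instead of concatenating a digit string and parsing it with int(), and locks in the letter at the first non-digit seen in reverse instead of overwriting it on every non-digit.
import Mathlib
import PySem

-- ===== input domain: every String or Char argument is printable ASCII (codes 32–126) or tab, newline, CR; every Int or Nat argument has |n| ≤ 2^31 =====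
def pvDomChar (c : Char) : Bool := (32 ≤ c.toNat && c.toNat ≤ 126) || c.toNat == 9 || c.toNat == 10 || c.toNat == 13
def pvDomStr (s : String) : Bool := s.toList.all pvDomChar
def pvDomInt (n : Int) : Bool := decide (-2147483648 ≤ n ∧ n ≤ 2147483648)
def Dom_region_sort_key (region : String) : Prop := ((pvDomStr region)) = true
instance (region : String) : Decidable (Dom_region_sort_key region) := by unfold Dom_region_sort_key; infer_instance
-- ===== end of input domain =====

-- B replaces A's forward loop (concatenate digit chars, re-read the result with int())
-- by a single reverse pass that assembles the number arithmetically from place values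
-- and locks in the letter at the first non-digit seen; objective: alternative.

-- ===== PORT A =====
-- A's loop: state (number : List Char, letter : String); int(number) → PySem.Int.ofChars?
-- (number holds only digit characters, so int() never raises; the .getD 0 is unreachable
-- when number ≠ []).
def region_sort_key (region : String) : Int × String :=
  let st := region.toList.foldl
    (fun (st : List Char × String) c =>
      if PySem.Chars.isdigit c then (st.1 ++ [c], st.2) else (st.1, String.ofList [c]))
    ([], "")
  ((if st.1 ≠ [] then (PySem.Int.ofChars? st.1).getD 0 else 0), st.2)

-- ===== PORT B =====
-- Source B's loop over reversed(region): state (value, place, letter);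
-- ord(c) - ord('0') → (c.toNat : Int) - 48.
def region_sort_key_alt (region : String) : Int × String :=
  let st := region.toList.reverse.foldl
    (fun (st : Int × Int × String) c =>
      if PySem.Chars.isdigit c then
        (st.1 + ((c.toNat : Int) - 48) * st.2.1, st.2.1 * 10, st.2.2)
      else if st.2.2 = "" then (st.1, st.2.1, String.ofList [c])
      else st)
    (0, 1, "")
  (st.1, st.2.2)

-- ===== PRECONDITION & SPEC =====
def Spec_region_sort_key (region : String) (out : Int × String) : Prop := out = region_sort_key_alt region
instance (region : String) (out : Int × String) : Decidable (Spec_region_sort_key region out) := by unfold Spec_region_sort_key; infer_instance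

-- ===== CLAIM (what is proved, stated in full; the proofs are below) =====
def Claim_equal_region_sort_key : Prop := ∀ (region : String), Dom_region_sort_key region → Spec_region_sort_key region (region_sort_key region)

-- ===== LEMMAS AND PROOFS =====

-- A's loop, in closed form: the collected digits and the last non-digit character.
lemma foldA_eq (l : List Char) (n : List Char) (ltr : String) :
    l.foldl
      (fun (st : List Char × String) c =>
        if PySem.Chars.isdigit c then (st.1 ++ [c], st.2) else (st.1, String.ofList [c]))
      (n, ltr)
    = (n ++ l.filter PySem.Chars.isdigit,
       match l.reverse.find? (fun c => !PySem.Chars.isdigit c) with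
       | some c => String.ofList [c]
       | none => ltr) := by
  induction l generalizing n ltr with
  | nil => simp
  | cons c l ih =>
    by_cases h : PySem.Chars.isdigit c = true <;>
      simp [h, ih, List.find?_append, Option.or] <;>
      cases l.reverse.find? (fun c => !PySem.Chars.isdigit c) <;> simp

-- B's loop, in closed form over the (already reversed) character list.
lemma foldB_eq (l : List Char) (v p : Int) (s : String) :
    l.foldl
      (fun (st : Int × Int × String) c =>
        if PySem.Chars.isdigit c then
          (st.1 + ((c.toNat : Int) - 48) * st.2.1, st.2.1 * 10, st.2.2)
        else if st.2.2 = "" then (st.1, st.2.1, String.ofList [c])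
        else st)
      (v, p, s)
    = (v + p * (l.filter PySem.Chars.isdigit).foldr
          (fun c a => ((c.toNat : Int) - 48) + 10 * a) 0,
       p * 10 ^ (l.filter PySem.Chars.isdigit).length,
       if s = "" then
         match l.find? (fun c => !PySem.Chars.isdigit c) with
         | some c => String.ofList [c]
         | none => s
       else s) := by
  induction l generalizing v p s with
  | nil => simp
  | cons c l ih =>
    by_cases h : PySem.Chars.isdigit c = true
    · simp only [List.foldl_cons, h, if_true, ih, List.filter_cons_of_pos h,
        List.foldr_cons, List.length_cons]
      have hf : List.find? (fun c => !PySem.Chars.isdigit c) (c :: l)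
          = List.find? (fun c => !PySem.Chars.isdigit c) l :=
        List.find?_cons_of_neg (by simp [h])
      rw [hf]
      refine Prod.ext (by ring) (Prod.ext (by ring) rfl)
    · have hfilter : (c :: l).filter PySem.Chars.isdigit = l.filter PySem.Chars.isdigit :=
        List.filter_cons_of_neg (by simp [h])
      by_cases hs : s = ""
      · subst hs
        have hfind : List.find? (fun c => !PySem.Chars.isdigit c) (c :: l) = some c := by
          rw [List.find?_cons]
          simp [h]
        have hmk : ¬ (String.ofList [c] = "") := by simp
        simp only [List.foldl_cons, if_neg h, ih, hfilter, hfind]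
        simp [hmk]
      · simp only [List.foldl_cons, if_neg h, if_neg hs, ih, hfilter]

-- PySem.Chars.isdigit gives the ASCII code bounds of a digit.
lemma isdigit_toNat {c : Char} (h : PySem.Chars.isdigit c = true) :
    48 ≤ c.toNat ∧ c.toNat ≤ 57 := by
  simp [PySem.Chars.isdigit] at h
  have h1 := Char.le_def.mp h.1
  have h2 := Char.le_def.mp h.2
  rw [UInt32.le_iff_toNat_le] at h1 h2
  exact ⟨h1, h2⟩

lemma isdigit_isDigit {c : Char} (h : PySem.Chars.isdigit c = true) :
    c.isDigit = true := by
  simp [PySem.Chars.isdigit] at h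
  simp only [Char.isDigit, Bool.and_eq_true, decide_eq_true_eq]
  exact ⟨Char.le_def.mp h.1, Char.le_def.mp h.2⟩

-- Abstract characterisation of the (private) digit-parsing worker of PySem.Int.ofChars?:
-- h is the digit parser, g its accumulator-carrying loop; the hypotheses pin down exactly
-- the reduction behaviour that holds definitionally for the private functions, and the
-- conclusion is the shape of the goal left after unfolding PySem.Int.ofChars?.
lemma digits_spec (h : List Char → Option Nat) (g : List Char → Bool → Nat → Option Nat)
    (hh : ∀ cs, h cs = match cs with | [] => none | cs => g cs false 0)
    (hg0 : ∀ (b : Bool) acc, g [] b acc = if b = true then some acc else none)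
    (hg1 : ∀ c rest (b : Bool) acc, c.isDigit = true →
      g (c :: rest) b acc = g rest true (acc * 10 + (c.toNat - '0'.toNat)))
    : ∀ L, L.all Char.isDigit = true → L ≠ [] →
      (Option.map (fun n : Int => n) ((h L).bind (fun a : Nat => some ((a : Nat) : Int))))
        = some ((L.foldl (fun a c => a * 10 + (c.toNat - '0'.toNat)) 0 : Nat) : Int) := by
  have main : ∀ L (b : Bool) acc, L.all Char.isDigit = true → L ≠ [] →
      g L b acc = some (L.foldl (fun a c => a * 10 + (c.toNat - '0'.toNat)) acc) := by
    intro L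
    induction L with
    | nil => intro b acc _ hne; exact absurd rfl hne
    | cons c rest ih =>
      intro b acc hall _
      simp only [List.all_cons, Bool.and_eq_true] at hall
      rw [hg1 c rest b acc hall.1]
      cases rest with
      | nil => rw [hg0]; simp
      | cons e t => rw [ih true _ hall.2 (by simp)]; simp
  intro L hall hne
  rw [hh]
  cases L with
  | nil => exact absurd rfl hne
  | cons c t =>
    rw [show (match c :: t with | [] => none | cs => g cs false 0) = g (c :: t) false 0 from rfl]
    rw [main (c :: t) false 0 hall hne]
    simp

-- int() on a nonempty string of pure ASCII digits is the plain decimal value.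
lemma ofChars_digits (ds : List Char) (h : ∀ c ∈ ds, PySem.Chars.isdigit c = true)
    (hne : ds ≠ []) :
    PySem.Int.ofChars? ds
      = some ((ds.foldl (fun a c => a * 10 + (c.toNat - '0'.toNat)) 0 : Nat) : Int) := by
  have hdig : ∀ c ∈ ds, c.isDigit = true := fun c hc => isdigit_isDigit (h c hc)
  have hns : ∀ c ∈ ds, PySem.Int.isIntSpace c = false := by
    intro c hc
    have := hdig c hc
    simp [Char.isDigit] at this
    simp only [PySem.Int.isIntSpace, Bool.or_eq_false_iff, decide_eq_false_iff_not]
    refine ⟨⟨⟨⟨⟨?_,?_⟩,?_⟩,?_⟩,?_⟩,?_⟩ <;> rintro rfl <;> simp_all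
  have hdw1 : List.dropWhile PySem.Int.isIntSpace ds = ds := by
    cases ds with
    | nil => rfl
    | cons c t => simp [List.dropWhile, hns c (by simp)]
  have hdw2 : List.dropWhile PySem.Int.isIntSpace ds.reverse = ds.reverse := by
    cases hr : ds.reverse with
    | nil => rfl
    | cons c t =>
      have hcm : c ∈ ds := by
        have : c ∈ ds.reverse := by rw [hr]; simp
        simpa using this
      simp [List.dropWhile, hns c hcm]
  cases ds with
  | nil => exact absurd rfl hne
  | cons c t =>
    have hc : c.isDigit = true := hdig c (by simp)
    have hall : (c :: t).all Char.isDigit = true := by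
      simp only [List.all_eq_true]; exact hdig
    unfold PySem.Int.ofChars?
    rw [hdw1, hdw2, List.reverse_reverse]
    dsimp only
    split
    · exfalso; rename_i heq; injection heq with h1 _; rw [h1] at hc
      simp [Char.isDigit] at hc
    · exfalso; rename_i heq; injection heq with h1 _; rw [h1] at hc
      simp [Char.isDigit] at hc
    · refine digits_spec _ ?g ?hh ?hg0 ?hg1 (c :: t) hall (by simp)
      case hh => intro cs; rfl
      case hg0 => intro b acc; rfl
      case hg1 =>
        intro c' rest b acc hcd
        conv_lhs => whnf
        rw [hcd]
        rfl

-- B's little-endian sum over the reversed digit list is A's big-endian decimal value.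
lemma lval_reverse (dl : List Char) (h : ∀ c ∈ dl, PySem.Chars.isdigit c = true) :
    (dl.reverse.foldr (fun c a => ((c.toNat : Int) - 48) + 10 * a) 0)
      = ((dl.foldl (fun a c => a * 10 + (c.toNat - '0'.toNat)) 0 : Nat) : Int) := by
  rw [List.foldr_reverse]
  have aux : ∀ (l : List Char), (∀ c ∈ l, PySem.Chars.isdigit c = true) → ∀ (a : Nat),
      l.foldl (fun b c => ((c.toNat : Int) - 48) + 10 * b) (a : Int)
        = ((l.foldl (fun b c => b * 10 + (c.toNat - '0'.toNat)) a : Nat) : Int) := by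
    intro l
    induction l with
    | nil => intro _ a; simp
    | cons c t ih =>
      intro hl a
      have hb := isdigit_toNat (hl c (by simp))
      have : ((c.toNat : Int) - 48) + 10 * (a : Nat)
          = ((a * 10 + (c.toNat - '0'.toNat) : Nat) : Int) := by
        push_cast [Nat.cast_sub hb.1]
        ring
      simp only [List.foldl_cons, this]
      exact ih (fun c hc => hl c (by simp [hc])) _
  simpa using aux dl h 0
-- ===== VERDICT (by name: the statement is the Claim_ definition above) =====
theorem region_sort_key_spec : Claim_equal_region_sort_key := by
  intro region _
  unfold Spec_region_sort_key region_sort_key region_sort_key_alt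
  simp only [foldA_eq, foldB_eq, List.nil_append, List.filter_reverse]
  refine Prod.ext ?_ rfl
  simp only
  by_cases hne : region.toList.filter PySem.Chars.isdigit = []
  · simp [hne]
  · have hmem : ∀ c ∈ region.toList.filter PySem.Chars.isdigit,
        PySem.Chars.isdigit c = true := by
      intro c hc; exact (List.mem_filter.mp hc).2
    rw [if_pos hne, ofChars_digits _ hmem hne, lval_reverse _ hmem]
    simp
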